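-- pv_equiv track=rewrite | github.com/woodno/raspberry | rpi-tutorial/RTC_DS1307.py | bcdToInt
-- ===== SOURCE A (Python) =====
-- def bcdToInt(bcd):
--     '''
--     Converts byte interpreted as two digit bcd to integer
--     (e.g. 88 = b01011000->bcd0101'1000 = 58)
--     '''
--     out = 0
--     for d in (bcd >> 4, bcd):
--         for p in (1, 2, 4 ,8):
--             if d & 1:
--                 out += p
--             d >>= 1
--         out *= 10
--     return out // 10
-- ===== SOURCE B (Python) =====
-- def bcdToInt(bcd):
--     '''
--     Converts byte interpreted as two digit bcd to integer
--     (e.g. 88 = b01011000->bcd0101'1000 = 58)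
--     '''
--     return ((bcd >> 4) & 0x0F) * 10 + (bcd & 0x0F)
-- ===== Notes on version B (the rewrite author's own statement) =====
-- stated objective: simpler
-- what changed: Replaced the bit-by-bit accumulation loops over both nibbles (and the trailing divide-back) by one closed-form arithmetic expression: high nibble times ten plus low nibble.
import Mathlib
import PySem

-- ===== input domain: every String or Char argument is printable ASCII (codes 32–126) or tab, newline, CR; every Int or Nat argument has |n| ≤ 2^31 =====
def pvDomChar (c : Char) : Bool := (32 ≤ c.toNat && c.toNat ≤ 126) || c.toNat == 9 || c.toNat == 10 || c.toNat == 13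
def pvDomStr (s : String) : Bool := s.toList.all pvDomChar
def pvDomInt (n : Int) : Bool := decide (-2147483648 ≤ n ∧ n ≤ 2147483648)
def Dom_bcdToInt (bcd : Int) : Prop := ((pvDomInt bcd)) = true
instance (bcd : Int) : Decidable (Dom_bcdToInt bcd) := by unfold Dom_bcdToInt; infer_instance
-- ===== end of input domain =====

-- B replaces A's bit-by-bit nibble-accumulation loops (and the trailing *10//10) by the
-- closed-form expression high-nibble*10 + low-nibble; objective: simpler.

-- ===== PORT A =====
-- inner loop body: for p in (1,2,4,8): if d & 1: out += p; d >>= 1   (state = (out, d))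
def bcdToInt (bcd : Int) : Int :=
  let out : Int :=
    ([bcd >>> (4:Nat), bcd] : List Int).foldl
      (fun out d =>
        (([1, 2, 4, 8] : List Int).foldl
          (fun (s : Int × Int) p =>
            (if PySem.Int.band s.2 1 ≠ 0 then s.1 + p else s.1, s.2 >>> (1:Nat)))
          (out, d)).1 * 10)
      0
  PySem.Int.floordiv out 10

-- ===== PORT B =====
def bcdToInt_alt (bcd : Int) : Int :=
  PySem.Int.band (bcd >>> (4:Nat)) 15 * 10 + PySem.Int.band bcd 15

-- ===== PRECONDITION & SPEC =====
def Spec_bcdToInt (bcd : Int) (out : Int) : Prop := out = bcdToInt_alt bcd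
instance (bcd : Int) (out : Int) : Decidable (Spec_bcdToInt bcd out) := by unfold Spec_bcdToInt; infer_instance

-- ===== CLAIM (what is proved, stated in full; the proofs are below) =====
def Claim_equal_bcdToInt : Prop := ∀ (bcd : Int), Dom_bcdToInt bcd → Spec_bcdToInt bcd (bcdToInt bcd)

-- ===== LEMMAS AND PROOFS =====

-- `d & 1` is `d % 2` (Python semantics, every d)
theorem band1_eq_emod (d : Int) : PySem.Int.band d 1 = d % 2 := by
  rw [PySem.Int.band_one, PySem.Int.mod_eq_emod_of_pos (by norm_num)]

-- low four bits of a natural number = n % 16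
theorem nat_and15 (n : Nat) : n &&& 15 = n % 16 := by
  have := Nat.and_two_pow_sub_one_eq_mod n 4
  norm_num at this
  exact this

-- `d & 15` extracts the low nibble, i.e. equals `d % 16`, also for negative d
theorem band15_eq_emod (d : Int) : PySem.Int.band d 15 = d % 16 := by
  by_cases h : 0 ≤ d
  · rw [PySem.Int.band_of_nonneg h (by norm_num)]
    have h15 : (15 : Int).toNat = 15 := rfl
    have key := nat_and15 d.toNat
    rw [h15, key]
    omega
  · unfold PySem.Int.band
    rw [if_neg (by omega), if_pos (by norm_num)]
    have h15 : (15 : Int).toNat = 15 := rfl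
    have key : 15 &&& (-d - 1).toNat = (-d - 1).toNat % 16 := by
      rw [Nat.and_comm]
      exact nat_and15 _
    rw [h15, key]
    omega

-- A's inner 4-bit loop sums the low four bits of d onto out, i.e. adds d % 16
theorem inner_loop_eq (out d : Int) :
    (([1, 2, 4, 8] : List Int).foldl
      (fun (s : Int × Int) p =>
        (if PySem.Int.band s.2 1 ≠ 0 then s.1 + p else s.1, s.2 >>> (1:Nat)))
      (out, d)).1 = out + d % 16 := by
  simp only [List.foldl, band1_eq_emod, Int.shiftRight_eq_div_pow]
  norm_num
  split_ifs <;> omega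

-- ===== VERDICT (by name: the statement is the Claim_ definition above) =====
theorem bcdToInt_spec : Claim_equal_bcdToInt := by
  intro bcd _
  show bcdToInt bcd = bcdToInt_alt bcd
  unfold bcdToInt bcdToInt_alt
  dsimp only
  rw [List.foldl_cons, List.foldl_cons, List.foldl_nil,
      inner_loop_eq, inner_loop_eq, band15_eq_emod, band15_eq_emod,
      PySem.Int.floordiv_eq_ediv_of_pos (by norm_num)]
  omega
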